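-- pv_equiv track=rewrite | github.com/RyoSpiralArchitect/SpiralReality-AIT | spiralreality_AIT_onepass_aifcore_integrated/integrated/boundary.py | _segments_to_boundaries
-- ===== SOURCE A (Python) =====
-- from typing import Dict, Iterable, List, Optional, Sequence, Tuple, TYPE_CHECKING
--
-- def _segments_to_boundaries(text: str, seg: Sequence[str]) -> List[int]:
--     cuts = set()
--     idx = 0
--     for tok in seg:
--         idx += len(tok)
--         if idx < len(text):
--             cuts.add(idx)
--     return [1 if (i + 1) in cuts else 0 for i in range(len(text) - 1)]
-- ===== SOURCE B (Python) =====
-- def _segments_to_boundaries(text, seg):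
--     out = []
--     pos = 0
--     idx = 0
--     for tok in seg:
--         idx += len(tok)
--         if pos < idx < len(text):
--             out.extend([0] * (idx - pos - 1))
--             out.append(1)
--             pos = idx
--     out.extend([0] * (len(text) - 1 - pos))
--     return out
-- ===== Notes on version B (the rewrite author's own statement) =====
-- stated objective: alternative
-- what changed: Builds the flag list front-to-back by run-length concatenation (a run of zeros then a 1 per boundary, plus a zero tail), instead of A's staging cut positions in a set and testing membership at every character position.
import Mathlib
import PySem

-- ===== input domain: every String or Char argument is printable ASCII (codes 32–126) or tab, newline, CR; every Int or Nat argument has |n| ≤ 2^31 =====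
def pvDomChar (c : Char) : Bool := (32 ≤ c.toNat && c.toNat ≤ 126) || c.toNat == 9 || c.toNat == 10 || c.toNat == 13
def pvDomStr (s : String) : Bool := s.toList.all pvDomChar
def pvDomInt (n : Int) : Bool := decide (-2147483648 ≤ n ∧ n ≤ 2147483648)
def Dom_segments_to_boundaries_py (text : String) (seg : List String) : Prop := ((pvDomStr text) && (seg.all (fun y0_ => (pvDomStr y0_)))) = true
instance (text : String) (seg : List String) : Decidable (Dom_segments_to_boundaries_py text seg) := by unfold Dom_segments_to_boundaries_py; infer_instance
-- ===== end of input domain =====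

-- B builds the flag list front-to-back by run-length concatenation (a run of zeros then a 1
-- per boundary, plus a zero tail), instead of A's set of cut positions plus a membership scan.

-- ===== PORT A =====
def segments_to_boundaries_py (text : String) (seg : List String) : List Int :=
  let n : Int := (text.toList.length : Int)
  let cuts : PySem.Set Int :=
    (seg.foldl
      (fun (st : PySem.Set Int × Int) tok =>
        let idx := st.2 + (tok.toList.length : Int)
        (if idx < n then PySem.Set.add st.1 idx else st.1, idx))
      (PySem.Set.empty, 0)).1
  (PySem.List.pyRange 0 (n - 1) 1).map (fun i => if (i + 1) ∈ cuts then (1 : Int) else 0)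

-- ===== PORT B =====
def segments_to_boundaries_py_alt (text : String) (seg : List String) : List Int :=
  let n : Int := (text.toList.length : Int)
  let st := seg.foldl
    (fun (st : List Int × Int × Int) tok =>
      let idx := st.2.2 + (tok.toList.length : Int)
      if st.2.1 < idx ∧ idx < n then
        (st.1 ++ PySem.List.pyRepeat [(0 : Int)] (idx - st.2.1 - 1) ++ [1], idx, idx)
      else (st.1, st.2.1, idx))
    ([], 0, 0)
  st.1 ++ PySem.List.pyRepeat [(0 : Int)] (n - 1 - st.2.1)

-- ===== PRECONDITION & SPEC =====
def Spec_segments_to_boundaries_py (text : String) (seg : List String) (out : List Int) : Prop := out = segments_to_boundaries_py_alt text seg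
instance (text : String) (seg : List String) (out : List Int) : Decidable (Spec_segments_to_boundaries_py text seg out) := by unfold Spec_segments_to_boundaries_py; infer_instance

-- ===== CLAIM (what is proved, stated in full; the proofs are below) =====
def Claim_equal_segments_to_boundaries_py : Prop := ∀ (text : String) (seg : List String), Dom_segments_to_boundaries_py text seg → Spec_segments_to_boundaries_py text seg (segments_to_boundaries_py text seg)

-- ===== LEMMAS AND PROOFS =====

-- running prefix sums of token lengths, starting from idx
def pvSums (idx : Int) : List String → List Int
  | [] => []
  | t :: ts => (idx + (t.toList.length : Int)) :: pvSums (idx + (t.toList.length : Int)) ts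

lemma pvSums_ge (idx : Int) (ts : List String) : ∀ s ∈ pvSums idx ts, idx ≤ s := by
  induction ts generalizing idx with
  | nil => simp [pvSums]
  | cons t ts ih =>
      intro s hs
      simp only [pvSums, List.mem_cons] at hs
      rcases hs with h | h
      · omega
      · have := ih _ s h; omega

lemma pvAfold (n : Int) (seg : List String) (idx : Int) (s : PySem.Set Int) (m : Int) :
    m ∈ (seg.foldl
      (fun (st : PySem.Set Int × Int) tok =>
        let idx := st.2 + (tok.toList.length : Int)
        (if idx < n then PySem.Set.add st.1 idx else st.1, idx))
      (s, idx)).1 ↔ m ∈ s ∨ (m ∈ pvSums idx seg ∧ m < n) := by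
  induction seg generalizing idx s with
  | nil => simp [pvSums]
  | cons t ts ih =>
      simp only [List.foldl_cons, pvSums, List.mem_cons]
      rw [ih]
      by_cases h : idx + (t.toList.length : Int) < n
      · simp only [if_pos h, PySem.Set.mem_add]
        constructor
        · rintro ((hs | he) | ⟨hm, hlt⟩)
          · exact Or.inl hs
          · exact Or.inr ⟨Or.inl he, by omega⟩
          · exact Or.inr ⟨Or.inr hm, hlt⟩
        · rintro (hs | ⟨(he | hm), hlt⟩)
          · exact Or.inl (Or.inl hs)
          · exact Or.inl (Or.inr he)
          · exact Or.inr ⟨hm, hlt⟩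
      · simp only [if_neg h]
        constructor
        · rintro (hs | ⟨hm, hlt⟩)
          · exact Or.inl hs
          · exact Or.inr ⟨Or.inr hm, hlt⟩
        · rintro (hs | ⟨(he | hm), hlt⟩)
          · exact Or.inl hs
          · exact absurd (show idx + (t.toList.length : Int) < n by omega) h
          · exact Or.inr ⟨hm, hlt⟩

-- the step function of B's fold (definitionally equal to the lambda in the port)
def pvStepB (n : Int) : List Int × Int × Int → String → List Int × Int × Int :=
  fun st tok =>
    let idx := st.2.2 + (tok.toList.length : Int)
    if st.2.1 < idx ∧ idx < n then
      (st.1 ++ PySem.List.pyRepeat [(0 : Int)] (idx - st.2.1 - 1) ++ [1], idx, idx)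
    else (st.1, st.2.1, idx)

-- invariant of B's run-building fold
lemma pvBfold (n : Int) (ts : List String) (out : List Int) (pos idx : Int)
    (hlen : (out.length : Int) = pos) (h0 : 0 ≤ pos) (hpi : pos ≤ idx) :
    ((((ts.foldl (pvStepB n) (out, pos, idx)).1.length : Int)
        = (ts.foldl (pvStepB n) (out, pos, idx)).2.1) ∧
     pos ≤ (ts.foldl (pvStepB n) (out, pos, idx)).2.1 ∧
     ((ts.foldl (pvStepB n) (out, pos, idx)).2.1 = pos ∨
       (ts.foldl (pvStepB n) (out, pos, idx)).2.1 < n) ∧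
     (∀ s ∈ pvSums idx ts, s < n → s ≤ (ts.foldl (pvStepB n) (out, pos, idx)).2.1) ∧
     (∀ j : Nat,
       ((ts.foldl (pvStepB n) (out, pos, idx)).1)[j]? =
         if (j : Int) < pos then out[j]?
         else if (j : Int) < (ts.foldl (pvStepB n) (out, pos, idx)).2.1 then
           some (if ((j : Int) + 1) ∈ pvSums idx ts then 1 else 0)
         else none)) := by
  induction ts generalizing out pos idx with
  | nil =>
      refine ⟨hlen, le_refl _, Or.inl rfl, by simp [pvSums], ?_⟩
      intro j
      simp only [List.foldl_nil, pvSums]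
      by_cases hj : (j : Int) < pos
      · rw [if_pos hj]
      · rw [if_neg hj, if_neg hj, List.getElem?_eq_none_iff]
        omega
  | cons t ts ih =>
      simp only [List.foldl_cons, pvSums, List.mem_cons]
      have hstep : pvStepB n (out, pos, idx) t =
          (if pos < idx + (t.toList.length : Int) ∧ idx + (t.toList.length : Int) < n then
            (out ++ PySem.List.pyRepeat [(0 : Int)] (idx + (t.toList.length : Int) - pos - 1) ++ [1],
              idx + (t.toList.length : Int), idx + (t.toList.length : Int))
          else (out, pos, idx + (t.toList.length : Int))) := rfl
      rw [hstep]
      set idx' := idx + (t.toList.length : Int) with hidx'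
      by_cases h : pos < idx' ∧ idx' < n
      · rw [if_pos h]
        have hrep : PySem.List.pyRepeat [(0 : Int)] (idx' - pos - 1)
            = List.replicate (idx' - pos - 1).toNat 0 := PySem.List.pyRepeat_singleton _ _
        have hlen' : (((out ++ PySem.List.pyRepeat [(0 : Int)] (idx' - pos - 1) ++ [1]).length : Int)) = idx' := by
          simp [hrep]; omega
        obtain ⟨ih1, ih2, ih3, ih4, ih5⟩ :=
          ih (out ++ PySem.List.pyRepeat [(0 : Int)] (idx' - pos - 1) ++ [1]) idx' idx'
            hlen' (by omega) (le_refl _)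
        refine ⟨ih1, by omega, ?_, ?_, ?_⟩
        · rcases ih3 with h3 | h3
          · exact Or.inr (lt_of_eq_of_lt h3 h.2)
          · exact Or.inr h3
        · intro s hs hsn
          rcases hs with hs | hs
          · omega
          · exact ih4 s hs hsn
        · intro j
          rw [ih5 j]
          by_cases hj1 : (j : Int) < pos
          · rw [if_pos (show (j : Int) < idx' by omega), if_pos hj1]
            rw [List.append_assoc, List.getElem?_append_left (by omega)]
          · rw [if_neg hj1]
            by_cases hj2 : (j : Int) < idx'
            · have hjf := lt_of_lt_of_le hj2 ih2
              rw [if_pos hj2, if_pos hjf]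
              by_cases hj3 : (j : Int) = idx' - 1
              · -- the appended 1
                have heq : ((j : Int) + 1 = idx') := by omega
                rw [if_pos (Or.inl heq)]
                rw [List.append_assoc, List.getElem?_append_right (by omega)]
                have hjo : j - out.length = (idx' - pos - 1).toNat := by omega
                rw [hjo]
                rw [List.getElem?_append_right (by simp [hrep])]
                simp [hrep]
              · -- a zero inside the run
                have hne : ((j : Int) + 1) ≠ idx' := by omega
                have hnot : ¬ ((j : Int) + 1) ∈ pvSums idx' ts := by
                  intro hc
                  have := pvSums_ge idx' ts _ hc
                  omega
                rw [if_neg (by rintro (hc | hc); exact hne hc; exact hnot hc)]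
                rw [List.append_assoc, List.getElem?_append_right (by omega)]
                rw [List.getElem?_append_left (by simp [hrep]; omega)]
                rw [hrep, List.getElem?_replicate, if_pos (by omega)]
            · rw [if_neg hj2]
              by_cases hj4 : (j : Int) < (ts.foldl (pvStepB n)
                  (out ++ PySem.List.pyRepeat [(0 : Int)] (idx' - pos - 1) ++ [1], idx', idx')).2.1
              · rw [if_pos hj4, if_pos hj4]
                have hne : ((j : Int) + 1) ≠ idx' := by omega
                by_cases hm : ((j : Int) + 1) ∈ pvSums idx' ts
                · rw [if_pos hm, if_pos (Or.inr hm)]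
                · rw [if_neg hm, if_neg (by rintro (hc | hc); exact hne hc; exact hm hc)]
              · rw [if_neg hj4, if_neg hj4]
      · rw [if_neg h]
        obtain ⟨ih1, ih2, ih3, ih4, ih5⟩ := ih out pos idx' hlen h0 (by omega)
        have hx : idx' ≤ pos ∨ n ≤ idx' := by
          by_contra hc
          push Not at hc
          exact h ⟨by omega, by omega⟩
        refine ⟨ih1, ih2, ih3, ?_, ?_⟩
        · intro s hs hsn
          rcases hs with hs | hs
          · omega
          · exact ih4 s hs hsn
        · intro j
          rw [ih5 j]
          by_cases hj1 : (j : Int) < pos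
          · rw [if_pos hj1, if_pos hj1]
          · rw [if_neg hj1, if_neg hj1]
            by_cases hj2 : (j : Int) < (ts.foldl (pvStepB n) (out, pos, idx')).2.1
            · rw [if_pos hj2, if_pos hj2]
              have hfin : ((j : Int) + 1) ≠ idx' := by
                intro hc
                rcases ih3 with h3 | h3 <;> omega
              by_cases hm : ((j : Int) + 1) ∈ pvSums idx' ts
              · rw [if_pos hm, if_pos (Or.inr hm)]
              · rw [if_neg hm, if_neg (by rintro (hc | hc); exact hfin hc; exact hm hc)]
            · rw [if_neg hj2, if_neg hj2]

lemma pvMain (text : String) (seg : List String) :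
    segments_to_boundaries_py text seg = segments_to_boundaries_py_alt text seg := by
  unfold segments_to_boundaries_py segments_to_boundaries_py_alt
  dsimp only
  set n : Int := (text.toList.length : Int) with hn
  have hn0 : 0 ≤ n := by simp [hn]
  have hfold : (seg.foldl
      (fun (st : List Int × Int × Int) tok =>
        let idx := st.2.2 + (tok.toList.length : Int)
        if st.2.1 < idx ∧ idx < n then
          (st.1 ++ PySem.List.pyRepeat [(0 : Int)] (idx - st.2.1 - 1) ++ [1], idx, idx)
        else (st.1, st.2.1, idx))
      ([], 0, 0)) = seg.foldl (pvStepB n) ([], 0, 0) := rfl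
  rw [hfold]
  obtain ⟨h1, h2, h3, h4, h5⟩ := pvBfold n seg [] 0 0 (by simp) (le_refl _) (le_refl _)
  set r := seg.foldl (pvStepB n) ([], 0, 0) with hr
  have hreptail : PySem.List.pyRepeat [(0 : Int)] (n - 1 - r.2.1)
      = List.replicate (n - 1 - r.2.1).toNat 0 := PySem.List.pyRepeat_singleton _ _
  apply List.ext_getElem?
  intro j
  rw [List.getElem?_map]
  by_cases hj : j < (n - 1).toNat
  · have hA : (PySem.List.pyRange 0 (n - 1) 1)[j]? = some ((0 : Int) + j) := by
      rw [List.getElem?_eq_getElem (by rw [PySem.List.length_pyRange_one]; omega)]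
      rw [PySem.List.getElem_pyRange_one]
    rw [hA, Option.map_some]
    have hmemA := pvAfold n seg 0 PySem.Set.empty ((0 : Int) + (j : Int) + 1)
    simp only [zero_add] at hmemA ⊢
    by_cases hjp : (j : Int) < r.2.1
    · -- inside the built prefix
      rw [List.getElem?_append_left (by omega), h5 j]
      rw [if_neg (by omega : ¬ (j : Int) < 0), if_pos hjp]
      by_cases hm : ((j : Int) + 1) ∈ pvSums 0 seg
      · have : ((j : Int) + 1) ∈ (seg.foldl
            (fun (st : PySem.Set Int × Int) tok =>
              let idx := st.2 + (tok.toList.length : Int)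
              (if idx < n then PySem.Set.add st.1 idx else st.1, idx))
            (PySem.Set.empty, 0)).1 := hmemA.mpr (Or.inr ⟨hm, by omega⟩)
        rw [if_pos this, if_pos hm]
      · have : ¬ ((j : Int) + 1) ∈ (seg.foldl
            (fun (st : PySem.Set Int × Int) tok =>
              let idx := st.2 + (tok.toList.length : Int)
              (if idx < n then PySem.Set.add st.1 idx else st.1, idx))
            (PySem.Set.empty, 0)).1 := by
          intro hc
          rcases hmemA.mp hc with hc' | ⟨hc', _⟩
          · simp [PySem.Set.empty] at hc'
          · exact hm hc'
        rw [if_neg this, if_neg hm]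
    · -- inside the zero tail
      rw [List.getElem?_append_right (by omega)]
      have hjt : j - r.1.length < (n - 1 - r.2.1).toNat := by omega
      rw [hreptail, List.getElem?_replicate, if_pos hjt]
      have hnot : ¬ ((j : Int) + 1) ∈ (seg.foldl
          (fun (st : PySem.Set Int × Int) tok =>
            let idx := st.2 + (tok.toList.length : Int)
            (if idx < n then PySem.Set.add st.1 idx else st.1, idx))
          (PySem.Set.empty, 0)).1 := by
        intro hc
        rcases hmemA.mp hc with hc' | ⟨hc', hcn⟩
        · simp [PySem.Set.empty] at hc'
        · have := h4 _ hc' hcn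
          omega
      rw [if_neg hnot]
  · have hA : (PySem.List.pyRange 0 (n - 1) 1)[j]? = none := by
      rw [List.getElem?_eq_none_iff, PySem.List.length_pyRange_one]
      omega
    have hB : (r.1 ++ PySem.List.pyRepeat [(0 : Int)] (n - 1 - r.2.1))[j]? = none := by
      rw [List.getElem?_eq_none_iff, List.length_append, hreptail, List.length_replicate]
      omega
    rw [hA, hB, Option.map_none]

-- ===== VERDICT (by name: the statement is the Claim_ definition above) =====
theorem segments_to_boundaries_py_spec : Claim_equal_segments_to_boundaries_py := by
  intro text seg _
  unfold Spec_segments_to_boundaries_py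
  exact pvMain text seg
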